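-- pv_equiv track=rewrite | github.com/JoseLuisCN9/TFM-RAG-Multimodal. | main.py | parse_docs
-- ===== SOURCE A (Python) =====
-- def parse_docs(docs):
--     images = []
--     texts = []
--     tables=[]
--     for doc in docs:
--         if doc[0][:5] == 'Table':
--             tables.append(doc)
--
--         elif doc[0][0] == '/':
--             images.append(doc)
--
--         else:
--             texts.append(doc)
--
--     for t in tables:
--         t[0] = t[0][6:]
--
--     return {"images": images, "texts": texts, "tables": tables}
-- ===== SOURCE B (Python) =====
-- def parse_docs(docs):
--     # three independent filter passes, one per bucket; tables are rebuilt with the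
--     # prefix stripped instead of mutated in place (return value identical to A's)
--     def kind(doc):
--         h = doc[0]
--         return "tables" if h[:5] == "Table" else "images" if h[0] == "/" else "texts"
--     return {
--         "images": [d for d in docs if kind(d) == "images"],
--         "texts": [d for d in docs if kind(d) == "texts"],
--         "tables": [[d[0][6:]] + d[1:] for d in docs if kind(d) == "tables"],
--     }
-- ===== Notes on version B (the rewrite author's own statement) =====
-- stated objective: alternative
-- what changed: B replaces A's single accumulator loop plus a mutating strip pass with three independent filter comprehensions driven by a shared kind() classifier, rebuilding each table row functionally ([d[0][6:]] + d[1:]) instead of mutating it; unlike A, B does not mutate the input docs, so the equivalence is about the return value.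
import Mathlib
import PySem

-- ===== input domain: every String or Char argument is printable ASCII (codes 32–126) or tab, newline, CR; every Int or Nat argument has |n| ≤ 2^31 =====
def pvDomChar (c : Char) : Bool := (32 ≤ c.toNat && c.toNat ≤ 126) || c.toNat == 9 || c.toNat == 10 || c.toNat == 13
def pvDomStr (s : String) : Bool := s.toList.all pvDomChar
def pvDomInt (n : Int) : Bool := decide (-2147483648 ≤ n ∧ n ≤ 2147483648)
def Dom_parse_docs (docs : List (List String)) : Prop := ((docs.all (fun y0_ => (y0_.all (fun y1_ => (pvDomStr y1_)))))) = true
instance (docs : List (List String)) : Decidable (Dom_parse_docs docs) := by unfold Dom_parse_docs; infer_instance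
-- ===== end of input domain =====

-- B rebuilds the three buckets by three independent filter passes over docs with a shared
-- classifier, constructing stripped table rows functionally instead of A's accumulator loop
-- plus mutating second pass (objective: alternative). A mutates table docs' first cell in
-- place, B does not mutate its input; the theorems here are about the returned value only.

-- ===== PORT A =====
-- loop body of A's first 'for doc in docs' pass (doc[0] via pyGetD: Pre_ keeps it in range)
def pvStepA (acc : List (List String) × List (List String) × List (List String))
    (doc : List String) :
    List (List String) × List (List String) × List (List String) :=
  let h := PySem.List.pyGetD doc 0 ""
  if PySem.Str.slice h none (some 5) == "Table" then (acc.1, acc.2.1, acc.2.2 ++ [doc])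
  else if PySem.Str.pyGet? h 0 == some '/' then (acc.1 ++ [doc], acc.2.1, acc.2.2)
  else (acc.1, acc.2.1 ++ [doc], acc.2.2)

def parse_docs (docs : List (List String)) : List (String × List (List String)) :=
  let r := docs.foldl pvStepA ([], [], [])
  let tables := r.2.2.map
    (fun t => PySem.List.pySetD t 0 (PySem.Str.slice (PySem.List.pyGetD t 0 "") (some 6) none))
  [("images", r.1), ("texts", r.2.1), ("tables", tables)]

-- ===== PORT B =====
-- B's kind(doc) classifier
def pvKind (doc : List String) : String :=
  let h := PySem.List.pyGetD doc 0 ""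
  if PySem.Str.slice h none (some 5) == "Table" then "tables"
  else if PySem.Str.pyGet? h 0 == some '/' then "images"
  else "texts"

def parse_docs_alt (docs : List (List String)) : List (String × List (List String)) :=
  [("images", docs.filter (fun d => pvKind d == "images")),
   ("texts", docs.filter (fun d => pvKind d == "texts")),
   ("tables", (docs.filter (fun d => pvKind d == "tables")).map
      (fun d => [PySem.Str.slice (PySem.List.pyGetD d 0 "") (some 6) none]
        ++ PySem.List.slice d (some 1) none))]

-- ===== PRECONDITION & SPEC =====
-- Pre_ excludes exactly the inputs where Python A raises IndexError: a doc that is the empty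
-- list, or whose first cell is the empty string (unless it has the 'Table' prefix, but a
-- 'Table'-prefixed first cell is never empty). B raises there too.
def Pre_parse_docs (docs : List (List String)) : Prop :=
  ∀ doc ∈ docs, doc ≠ [] ∧ doc.getD 0 "" ≠ ""
instance (docs : List (List String)) : Decidable (Pre_parse_docs docs) := by
  unfold Pre_parse_docs; infer_instance

def pvWitness_parse_docs : List (List String) :=
  [["Table 1: stats", "body"], ["/img/p.png", "cap"], ["plain text"]]

def Spec_parse_docs (docs : List (List String)) (out : List (String × List (List String))) : Prop := out = parse_docs_alt docs
instance (docs : List (List String)) (out : List (String × List (List String))) : Decidable (Spec_parse_docs docs out) := by unfold Spec_parse_docs; infer_instance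

-- ===== CLAIM =====
def Claim_equal_parse_docs : Prop := ∀ (docs : List (List String)), Dom_parse_docs docs → Pre_parse_docs docs → Spec_parse_docs docs (parse_docs docs)

-- ===== LEMMAS AND PROOFS =====

-- A's accumulator triple, characterised per component as a filter over docs
lemma pvFoldA_images (docs : List (List String)) : ∀ I T B,
    (docs.foldl pvStepA (I, T, B)).1 = I ++ docs.filter (fun d => pvKind d == "images") := by
  induction docs with
  | nil => simp
  | cons d ds ih =>
    intro I T B
    rw [List.foldl_cons]
    by_cases h1 : PySem.Str.slice (PySem.List.pyGetD d 0 "") none (some 5) = "Table"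
    · simp [pvStepA, pvKind, h1, ih]
    by_cases h2 : PySem.List.pyGet? (PySem.List.pyGetD d 0 "").toList 0 = some '/'
    · simp [pvStepA, pvKind, h1, h2, ih]
    · simp [pvStepA, pvKind, h1, h2, ih]

lemma pvFoldA_texts (docs : List (List String)) : ∀ I T B,
    (docs.foldl pvStepA (I, T, B)).2.1 = T ++ docs.filter (fun d => pvKind d == "texts") := by
  induction docs with
  | nil => simp
  | cons d ds ih =>
    intro I T B
    rw [List.foldl_cons]
    by_cases h1 : PySem.Str.slice (PySem.List.pyGetD d 0 "") none (some 5) = "Table"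
    · simp [pvStepA, pvKind, h1, ih]
    by_cases h2 : PySem.List.pyGet? (PySem.List.pyGetD d 0 "").toList 0 = some '/'
    · simp [pvStepA, pvKind, h1, h2, ih]
    · simp [pvStepA, pvKind, h1, h2, ih]

lemma pvFoldA_tables (docs : List (List String)) : ∀ I T B,
    (docs.foldl pvStepA (I, T, B)).2.2 = B ++ docs.filter (fun d => pvKind d == "tables") := by
  induction docs with
  | nil => simp
  | cons d ds ih =>
    intro I T B
    rw [List.foldl_cons]
    by_cases h1 : PySem.Str.slice (PySem.List.pyGetD d 0 "") none (some 5) = "Table"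
    · simp [pvStepA, pvKind, h1, ih]
    by_cases h2 : PySem.List.pyGet? (PySem.List.pyGetD d 0 "").toList 0 = some '/'
    · simp [pvStepA, pvKind, h1, h2, ih]
    · simp [pvStepA, pvKind, h1, h2, ih]

-- on a nonempty doc, A's in-place strip equals B's functional rebuild
lemma pvStrip_eq (t : List String) (ht : t ≠ []) :
    PySem.List.pySetD t 0 (PySem.Str.slice (PySem.List.pyGetD t 0 "") (some 6) none)
      = [PySem.Str.slice (PySem.List.pyGetD t 0 "") (some 6) none]
        ++ PySem.List.slice t (some 1) none := by
  cases t with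
  | nil => exact absurd rfl ht
  | cons h rest =>
    simp [PySem.List.pySetD, PySem.List.pySet?, PySem.List.pyIdx?, PySem.List.pyGetD,
      PySem.List.slice]

-- ===== VERDICT =====
theorem parse_docs_spec : Claim_equal_parse_docs := by
  intro docs _ hpre
  unfold Spec_parse_docs parse_docs parse_docs_alt
  simp only [pvFoldA_images, pvFoldA_texts, pvFoldA_tables, List.nil_append]
  refine congrArg (fun x => [("images", docs.filter (fun d => pvKind d == "images")),
    ("texts", docs.filter (fun d => pvKind d == "texts")), ("tables", x)]) ?_
  apply List.map_congr_left
  intro t ht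
  exact pvStrip_eq t ((hpre t (List.mem_of_mem_filter ht)).1)
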